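-- pv_equiv track=rewrite | github.com/hminyeong/RecOne_AITech_01 | 소경학/kt/3.py | solution
-- ===== SOURCE A (Python) =====
-- from itertools import combinations
--
-- def solution(prj, n, k):
--     dic = {}
--     total = ["zzzzzzzzzzzzzzzzzzzzzz"]
--     for i in range(len(prj)):
--         for j in range(len(prj[i])):
--             for t in range(len(prj[i])):
--                 if j == t:
--                     continue
--                 if prj[i][j] not in dic:
--                     dic[prj[i][j]] = [prj[i][t]]
--                 else:
--                     dic[prj[i][j]].append(prj[i][t])
--     array = []
--     for i in dic:
--         array.append(i)
--         dic[i] = list(set(dic[i]))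
--         dic[i].sort()
--     array.sort()
--     check = {}
--     for i in array:
--         check[i] = 0
--     def DFS(v,check,st):
--         if total[0] < st:
--             return
--         if v == len(array):
--             if total[0] > st:
--                 total[0] = st
--             return
--         node = array[v]
--         a = list(combinations(dic[node],n))
--         for j in a:
--             b = []
--             ss = st
--             cc = 0
--             for l in j:
--                 if check[l] > k-1:
--                     cc = 1
--                     break
--                 else:
--                     b.append(l)
--             if cc == 0:
--                 for l in b:
--                     check[l] += 1
--                     ss += l
--                 DFS(v+1,check,ss)
--                 for l in b:
--                     check[l] -= 1
--     DFS(0,check,"")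
--     answer = total[0]
--     return answer
-- ===== SOURCE B (Python) =====
-- from itertools import combinations, product
--
-- def solution(prj, n, k):
--     # adjacency: element -> set of co-members (other positions of the same row)
--     dic = {}
--     for row in prj:
--         for j in range(len(row)):
--             others = row[:j] + row[j + 1:]
--             if others:
--                 dic.setdefault(row[j], set()).update(others)
--     array = sorted(dic)
--     choices = [list(combinations(sorted(dic[x]), n)) for x in array]
--     best = "zzzzzzzzzzzzzzzzzzzzzz"
--     for combo in product(*choices):
--         flat = [l for c in combo for l in c]
--         if all(flat.count(x) <= k for x in flat):
--             cand = "".join(flat)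
--             if cand < best:
--                 best = cand
--     return best
-- ===== Notes on version B (the rewrite author's own statement) =====
-- stated objective: alternative
-- what changed: Replaces the pruned recursive DFS with a mutable best cell and incremental capacity counters by exhaustive enumeration: itertools.product over per-node combination lists, validating each complete assignment at once via flat occurrence counts and folding the lexicographic minimum.
import Mathlib
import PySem

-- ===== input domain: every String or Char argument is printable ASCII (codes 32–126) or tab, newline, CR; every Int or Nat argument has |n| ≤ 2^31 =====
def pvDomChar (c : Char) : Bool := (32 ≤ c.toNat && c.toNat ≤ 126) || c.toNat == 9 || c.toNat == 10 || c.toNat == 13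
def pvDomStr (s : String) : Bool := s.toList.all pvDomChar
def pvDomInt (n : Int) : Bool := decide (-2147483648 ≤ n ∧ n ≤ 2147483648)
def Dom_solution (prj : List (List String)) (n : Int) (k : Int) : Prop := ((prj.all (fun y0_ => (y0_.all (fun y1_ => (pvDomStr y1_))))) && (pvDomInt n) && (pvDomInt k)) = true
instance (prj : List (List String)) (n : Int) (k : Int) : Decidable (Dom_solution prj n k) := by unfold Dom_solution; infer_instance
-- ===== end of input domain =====

-- B replaces A's pruned recursive DFS (mutable best + incremental capacity counters) by exhaustive
-- enumeration over the product of per-node combination lists, checking each complete assignment at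
-- once via flat occurrence counts (objective: alternative; same worst-case cost).
-- A mutates only its own local dict/list cells; neither version mutates its arguments.

-- ===== PORT A =====
-- 'for l in j: if check[l] > k-1: cc = 1; break; else: b.append(l)'  (b = elements before the break)
def pvScanA (check : PySem.Dict String Int) (k : Int) : List String → List String × Int
  | [] => ([], 0)
  | l :: rest =>
    if check.getD l 0 > k - 1 then ([], 1)
    else
      let p := pvScanA check k rest
      (l :: p.1, p.2)

-- the recursive DFS; Python mutates check and restores it before returning, so the functional port
-- passes the updated dict only into the recursive call; 'total' is the best-so-far cell total[0];
-- check[l] is read with getD (every l looked up is a key: the adjacency relation is symmetric)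
def pvDFS (dic : PySem.Dict String (List String)) (n k : Int) :
    List String → PySem.Dict String Int → String → String → String
  | [], _check, st, total =>
      if total < st then total
      else if total > st then st else total
  | node :: rest, check, st, total =>
      if total < st then total
      else
        (PySem.List.combinations (dic.getD node []) n.toNat).foldl
          (fun total j =>
            let p := pvScanA check k j
            if p.2 = 0 then
              -- 'for l in b: check[l] += 1; ss += l'
              let q := p.1.foldl
                (fun (s : PySem.Dict String Int × String) l =>
                  (s.1.insert l (s.1.getD l 0 + 1), s.2 ++ l)) (check, st)
              pvDFS dic n k rest q.1 q.2 total
            else total)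
          total

-- the triple index loop building dic
def pvBuildA (prj : List (List String)) : PySem.Dict String (List String) :=
  (PySem.List.pyRange 0 (PySem.List.len prj)).foldl (fun dic i =>
    let row := PySem.List.pyGetD prj i []
    (PySem.List.pyRange 0 (PySem.List.len row)).foldl (fun dic j =>
      (PySem.List.pyRange 0 (PySem.List.len row)).foldl (fun dic t =>
        if j == t then dic
        else
          let x := PySem.List.pyGetD row j ""
          let y := PySem.List.pyGetD row t ""
          if dic.contains x then dic.modify x [] (· ++ [y]) else dic.insert x [y]) dic) dic) PySem.Dict.empty

def solution (prj : List (List String)) (n : Int) (k : Int) : String :=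
  let dic := pvBuildA prj
  -- 'for i in dic: array.append(i); dic[i] = list(set(dic[i])); dic[i].sort()'
  -- (value updates never change the key list, so the iteration is over dic.keys;
  --  list(set(..)) followed by .sort() is the sorted distinct elements, order-independent)
  let p := dic.keys.foldl
    (fun (s : List String × PySem.Dict String (List String)) i =>
      (s.1 ++ [i],
       s.2.modify i [] (fun v => PySem.List.sorted (PySem.Set.ofList v) (fun x => x) false)))
    ([], dic)
  let array := PySem.List.sorted p.1 (fun x => x) false
  -- 'check = {}; for i in array: check[i] = 0'
  let check := array.foldl (fun d i => d.insert i (0 : Int)) PySem.Dict.empty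
  pvDFS p.2 n k array check "" "zzzzzzzzzzzzzzzzzzzzzz"

-- ===== PORT B =====
-- itertools.product(*lists), leftmost factor varying slowest
def pvProduct : List (List (List String)) → List (List (List String))
  | [] => [[]]
  | c :: cs => c.flatMap (fun x => (pvProduct cs).map (x :: ·))

-- 'for row in prj: for j in range(len(row)): others = row[:j]+row[j+1:];
--    if others: dic[row[j]] = dic.get(row[j], set()).union(others)'
def pvBuildB (prj : List (List String)) : PySem.Dict String (PySem.Set String) :=
  prj.foldl (fun dic row =>
    (PySem.List.pyRange 0 (PySem.List.len row)).foldl (fun dic j =>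
      let others := PySem.List.slice row none (some j) ++ PySem.List.slice row (some (j + 1)) none
      if others = [] then dic
      else
        let x := PySem.List.pyGetD row j ""
        dic.insert x (PySem.Set.union (dic.getD x []) others)) dic) PySem.Dict.empty

def solution_alt (prj : List (List String)) (n : Int) (k : Int) : String :=
  let dic := pvBuildB prj
  let array := PySem.List.sorted dic.keys (fun x => x) false
  let choices := array.map (fun x =>
    PySem.List.combinations (PySem.List.sorted (dic.getD x []) (fun y => y) false) n.toNat)
  (pvProduct choices).foldl
    (fun best combo =>
      let flat := combo.flatMap (fun c => c)
      if flat.all (fun x => decide ((PySem.List.count flat x : Int) ≤ k)) then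
        let cand := PySem.Str.join "" flat
        if cand < best then cand else best
      else best)
    "zzzzzzzzzzzzzzzzzzzzzz"

-- ===== PRECONDITION & SPEC =====
-- A raises ValueError (combinations with negative r) exactly when n < 0 and the adjacency dict is
-- nonempty, i.e. some row has at least two positions; Pre_ excludes exactly those inputs.
def Pre_solution (prj : List (List String)) (n : Int) (k : Int) : Prop :=
  0 ≤ n ∨ ∀ row ∈ prj, row.length < 2
instance (prj : List (List String)) (n : Int) (k : Int) : Decidable (Pre_solution prj n k) := by
  unfold Pre_solution; infer_instance

def pvWitness_solution : List (List String) × Int × Int := ([["a", "b"]], 1, 1)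

def Spec_solution (prj : List (List String)) (n : Int) (k : Int) (out : String) : Prop := out = solution_alt prj n k
instance (prj : List (List String)) (n : Int) (k : Int) (out : String) : Decidable (Spec_solution prj n k out) := by unfold Spec_solution; infer_instance

-- ===== CLAIM (what is proved, stated in full; the proofs are below) =====
def Claim_equal_solution : Prop := ∀ (prj : List (List String)) (n : Int) (k : Int), Dom_solution prj n k → Pre_solution prj n k → Spec_solution prj n k (solution prj n k)

-- ===== LEMMAS AND PROOFS =====

-- proof-side abbreviations
def pvStep (b c : String) : String := if c < b then c else b
def pvSJoin (l : List String) : String := l.foldl (fun s t => s ++ t) ""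
def pvBump (check : PySem.Dict String Int) (j : List String) : PySem.Dict String Int :=
  j.foldl (fun d l => d.insert l (d.getD l 0 + 1)) check
def pvOkC (check : PySem.Dict String Int) (k : Int) (j : List String) : Bool :=
  j.all (fun l => decide (check.getD l 0 ≤ k - 1))
def pvCondL (check : PySem.Dict String Int) (k : Int) (flat : List String) : Bool :=
  flat.all (fun l => decide (check.getD l 0 + (flat.count l : Int) ≤ k))
def pvValids (ch : String → List (List String)) (k : Int) :
    List String → PySem.Dict String Int → List String
  | [], _ => [""]
  | node :: rest, check =>
      (ch node).flatMap (fun j =>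
        if pvOkC check k j then
          (pvValids ch k rest (pvBump check j)).map (fun u => pvSJoin j ++ u)
        else [])
def pvAppendAll (d : PySem.Dict String (List String)) (x : String) (ys : List String) :
    PySem.Dict String (List String) :=
  ys.foldl (fun d y => if d.contains x then d.modify x [] (· ++ [y]) else d.insert x [y]) d
def pvR (dA : PySem.Dict String (List String)) (dB : PySem.Dict String (PySem.Set String)) : Prop :=
  dA.keys = dB.keys ∧ dA.keys.Nodup ∧ ∀ x, PySem.Set.ofList (dA.getD x []) = dB.getD x []

-- string order facts
theorem pv_not_append_lt (s t : String) : ¬ s ++ t < s := by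
  rw [String.lt_iff_toList_lt, String.toList_append]
  generalize s.toList = l
  induction l with
  | nil => simp
  | cons a as ih =>
      intro h
      rw [List.cons_append, List.cons_lt_cons_iff] at h
      rcases h with h | ⟨-, h⟩
      · exact absurd rfl h.ne
      · exact ih h

theorem pv_foldl_step_const {L : List String} {t : String}
    (h : ∀ x ∈ L, ¬ x < t) : L.foldl pvStep t = t := by
  induction L with
  | nil => rfl
  | cons a as ih =>
      simp only [List.foldl_cons, pvStep, if_neg (h a (by simp))]
      exact ih (fun x hx => h x (by simp [hx]))

theorem pv_foldl_step_flatMap {α : Type} (g : α → List String) (L : List α) (t : String) :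
    (L.flatMap g).foldl pvStep t = L.foldl (fun t j => (g j).foldl pvStep t) t := by
  induction L generalizing t with
  | nil => rfl
  | cons a as ih => simp only [List.flatMap_cons, List.foldl_append, List.foldl_cons, ih]

theorem pv_sjoin_fold (l : List String) (st : String) :
    l.foldl (fun s t => s ++ t) st = st ++ pvSJoin l := by
  induction l generalizing st with
  | nil => simp [pvSJoin]
  | cons a as ih =>
      simp only [pvSJoin, List.foldl_cons, String.empty_append] at *
      rw [ih (st ++ a), ih a, String.append_assoc]

theorem pv_sjoin_append (a b : List String) : pvSJoin (a ++ b) = pvSJoin a ++ pvSJoin b := by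
  simp only [pvSJoin, List.foldl_append]
  rw [pv_sjoin_fold b (List.foldl (fun s t => s ++ t) "" a)]
  rfl

theorem pv_sjoin_cons (a : String) (l : List String) : pvSJoin (a :: l) = a ++ pvSJoin l := by
  simp only [pvSJoin, List.foldl_cons, String.empty_append]
  exact pv_sjoin_fold l a

theorem pv_sjoin_toList (l : List String) :
    (pvSJoin l).toList = (l.map String.toList).flatten := by
  induction l with
  | nil => rfl
  | cons a as ih =>
      rw [pv_sjoin_cons, List.map_cons, List.flatten_cons, String.toList_append, ih]

theorem pv_intercalate_nil (xs : List (List Char)) : List.intercalate [] xs = xs.flatten := by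
  simp only [List.intercalate]
  induction xs with
  | nil => rfl
  | cons a as ih => cases as <;> simp_all [List.intersperse]

theorem pv_sjoin_join (l : List String) : PySem.Str.join "" l = pvSJoin l := by
  apply String.toList_inj.mp
  rw [pv_sjoin_toList]
  show (String.ofList (PySem.Chars.join "".toList (l.map String.toList))).toList = _
  rw [String.toList_ofList]
  exact pv_intercalate_nil _

theorem pv_scanA_pos (check : PySem.Dict String Int) (k : Int) (j : List String)
    (h : pvOkC check k j = true) : pvScanA check k j = (j, 0) := by
  induction j with
  | nil => rfl
  | cons a as ih =>
      simp only [pvOkC, List.all_cons, Bool.and_eq_true, decide_eq_true_eq] at h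
      simp only [pvScanA, if_neg (by omega : ¬ check.getD a 0 > k - 1), ih h.2]

theorem pv_scanA_neg (check : PySem.Dict String Int) (k : Int) (j : List String)
    (h : pvOkC check k j = false) : (pvScanA check k j).2 = 1 := by
  induction j with
  | nil => simp [pvOkC] at h
  | cons a as ih =>
      simp only [pvOkC, List.all_cons, Bool.and_eq_false_iff, decide_eq_false_iff_not] at h
      by_cases hc : check.getD a 0 > k - 1
      · simp [pvScanA, hc]
      · have : pvOkC check k as = false := by
          rcases h with h | h
          · omega
          · simpa [pvOkC] using h
        simp [pvScanA, hc, ih this]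

-- Main lemma 1: the DFS computes the running minimum over pvValids
theorem pv_dfs_eq (dic : PySem.Dict String (List String)) (n k : Int) :
    ∀ (remaining : List String) (check : PySem.Dict String Int) (st total : String),
    pvDFS dic n k remaining check st total
      = ((pvValids (fun node => PySem.List.combinations (dic.getD node []) n.toNat) k
            remaining check).map (fun u => st ++ u)).foldl pvStep total := by
  intro remaining
  induction remaining with
  | nil =>
      intro check st total
      simp only [pvDFS, pvValids, List.map_cons, List.map_nil, List.foldl_cons, List.foldl_nil,
        pvStep, String.append_empty]
      rcases lt_trichotomy total st with h | h | h
      · rw [if_pos h, if_neg (by exact fun hc => absurd (lt_trans hc h) (lt_irrefl _))]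
      · subst h; simp
      · rw [if_neg (by exact fun hc => absurd (lt_trans hc h) (lt_irrefl _)), if_pos h]
  | cons node rest ih =>
      intro check st total
      rw [pvDFS, pvValids]
      by_cases hp : total < st
      · rw [if_pos hp]
        refine (pv_foldl_step_const ?_).symm
        intro x hx
        simp only [List.mem_map] at hx
        obtain ⟨u, -, rfl⟩ := hx
        intro hlt
        exact pv_not_append_lt st u (lt_trans hlt hp)
      · rw [if_neg hp, List.map_flatMap, pv_foldl_step_flatMap]
        apply PySem.List.foldl_congr_mem
        intro acc j hj
        by_cases hok : pvOkC check k j = true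
        · rw [pv_scanA_pos check k j hok]
          simp only [if_pos hok,
            PySem.List.foldl_prod_mk (f := fun (d : PySem.Dict String Int) (l : String) => d.insert l (d.getD l 0 + 1))
              (g := fun (s : String) (l : String) => s ++ l), pv_sjoin_fold]
          rw [ih]
          simp only [List.map_map, String.append_assoc]
          rfl
        · rw [if_neg (by simp [pv_scanA_neg check k j (by simpa using hok)]),
            if_neg hok]
          simp

-- Core counting lemma: sequential per-node feasibility = whole-assignment counts
theorem pv_cond_split (check : PySem.Dict String Int) (k : Int) (j F : List String)
    (hj : j.Nodup) :
    pvCondL check k (j ++ F) = (pvOkC check k j && pvCondL (pvBump check j) k F) := by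
  have hb : ∀ l, (pvBump check j).getD l 0 = check.getD l 0 + (j.count l : Int) :=
    fun l => PySem.Dict.getD_foldl_insert_add_one j check l
  rw [Bool.eq_iff_iff]
  simp only [pvCondL, pvOkC, List.all_append, Bool.and_eq_true, List.all_eq_true,
    decide_eq_true_eq, List.count_append, hb]
  constructor
  · rintro ⟨h1, h2⟩
    refine ⟨fun l hl => ?_, fun l hl => ?_⟩
    · have hc1 : List.count l j = 1 := List.count_eq_one_of_mem hj hl
      have := h1 l hl
      omega
    · have := h2 l hl
      push_cast at this ⊢
      omega
  · rintro ⟨h1, h2⟩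
    refine ⟨fun l hl => ?_, fun l hl => ?_⟩
    · by_cases hf : l ∈ F
      · have := h2 l hf
        push_cast at this ⊢
        omega
      · have hc0 : List.count l F = 0 := List.count_eq_zero_of_not_mem hf
        have hc1 : List.count l j = 1 := List.count_eq_one_of_mem hj hl
        have := h1 l hl
        omega
    · have := h2 l hl
      push_cast at this ⊢
      omega

-- Main lemma 2: pvValids = filtered product
theorem pv_valids_eq (ch : String → List (List String)) (k : Int) :
    ∀ (remaining : List String) (check : PySem.Dict String Int),
    (∀ node ∈ remaining, ∀ j ∈ ch node, j.Nodup) →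
    pvValids ch k remaining check
      = (pvProduct (remaining.map ch)).filterMap (fun combo =>
          if pvCondL check k (combo.flatMap (fun c => c)) then
            some (pvSJoin (combo.flatMap (fun c => c)))
          else none) := by
  intro remaining
  induction remaining with
  | nil =>
      intro check _h
      simp [pvValids, pvProduct, pvCondL, pvSJoin]
  | cons node rest ih =>
      intro check h
      rw [pvValids, List.map_cons, pvProduct, List.filterMap_flatMap]
      refine List.flatMap_congr (fun j hj => ?_)
      have hjn : j.Nodup := h node (by simp) j hj
      rw [List.filterMap_map]
      have hrest : ∀ node ∈ rest, ∀ j ∈ ch node, j.Nodup :=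
        fun nd hnd => h nd (by simp [hnd])
      by_cases hok : pvOkC check k j = true
      · rw [if_pos hok, ih (pvBump check j) hrest, List.map_filterMap]
        refine congrFun (congrArg _ (funext fun combo => ?_)) _
        simp only [Function.comp, List.flatMap_cons, pv_cond_split check k j _ hjn, hok,
          Bool.true_and, pv_sjoin_append]
        split
        · rfl
        · rfl
      · rw [if_neg hok]
        refine (List.filterMap_eq_nil_iff.mpr (fun combo _ => ?_)).symm
        simp only [Function.comp, List.flatMap_cons, pv_cond_split check k j _ hjn,
          Bool.and_eq_true]
        rw [if_neg (by simp [hok])]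

theorem pv_foldl_filterMap_if {α : Type} (L : List α) (p : α → Bool) (f : α → String)
    (init : String) :
    (L.filterMap (fun x => if p x then some (f x) else none)).foldl pvStep init
      = L.foldl (fun b x => if p x then pvStep b (f x) else b) init := by
  induction L generalizing init with
  | nil => rfl
  | cons a as ih =>
      by_cases hp : p a
      · simp only [List.filterMap_cons, hp, if_pos, List.foldl_cons, ih]
      · simp only [List.filterMap_cons, hp, List.foldl_cons, ih, Bool.false_eq_true,
          ite_false]

-- generic fold helpers
theorem pv_foldl_rel {α β γ : Type} (R : β → γ → Prop) (f : β → α → β) (g : γ → α → γ)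
    (l : List α) (h : ∀ b c a, a ∈ l → R b c → R (f b a) (g c a)) :
    ∀ b c, R b c → R (l.foldl f b) (l.foldl g c) := by
  induction l with
  | nil => exact fun b c h => h
  | cons a as ih =>
      exact fun b c hbc =>
        ih (fun b c a' ha' => h b c a' (by simp [ha'])) _ _ (h b c a (by simp) hbc)

theorem pv_foldl_pres {α β : Type} (P : β → Prop) (f : β → α → β) (l : List α)
    (h : ∀ b a, P b → P (f b a)) : ∀ b, P b → P (l.foldl f b) := by
  induction l with
  | nil => exact fun b hb => hb
  | cons a as ih => exact fun b hb => ih _ (h b a hb)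

theorem pv_rangefold {α β : Type} (f : β → α → β) (dflt : α) :
    ∀ (l : List α) (d : β),
    (List.range l.length).foldl (fun d t => f d (l.getD t dflt)) d = l.foldl f d := by
  intro l
  induction l with
  | nil => intro d; rfl
  | cons a as ih =>
      intro d
      rw [List.length_cons, List.range_succ_eq_map, List.foldl_cons, List.foldl_map]
      simp only [List.getD_cons_zero, List.getD_cons_succ, Nat.succ_eq_add_one]
      exact ih (f d a)

theorem pv_skipfold {α β : Type} (f : β → α → β) (dflt : α) :
    ∀ (l : List α) (j : Nat) (d : β),
    (List.range l.length).foldl (fun d t => if j = t then d else f d (l.getD t dflt)) d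
      = (l.take j ++ l.drop (j + 1)).foldl f d := by
  intro l
  induction l with
  | nil => intro j d; simp
  | cons a as ih =>
      intro j d
      rw [List.length_cons, List.range_succ_eq_map, List.foldl_cons, List.foldl_map]
      cases j with
      | zero =>
          rw [if_pos rfl]
          simp only [List.getD_cons_succ, Nat.succ_eq_add_one, List.take_zero, List.drop_succ_cons,
            List.drop_zero, List.nil_append]
          have heq0 : (fun (d : β) (t : Nat) => if 0 = t + 1 then d else f d (as.getD t dflt))
              = fun d t => f d (as.getD t dflt) := by
            funext d t
            simp
          rw [heq0]
          exact pv_rangefold f dflt as d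
      | succ j' =>
          rw [if_neg (by omega)]
          simp only [List.getD_cons_succ, Nat.succ_eq_add_one, List.take_succ_cons,
            List.drop_succ_cons, List.cons_append, List.foldl_cons]
          have heq : (fun (d : β) (t : Nat) => if j' + 1 = t + 1 then d else f d (as.getD t dflt))
              = fun d t => if j' = t then d else f d (as.getD t dflt) := by
            funext d t
            simp [Nat.add_right_cancel_iff]
          rw [heq]
          exact ih j' (f d a)

-- pvAppendAll facts
theorem pv_appendAll_getD_self (d : PySem.Dict String (List String)) (x : String)
    (ys : List String) : (pvAppendAll d x ys).getD x [] = d.getD x [] ++ ys := by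
  induction ys generalizing d with
  | nil => simp [pvAppendAll]
  | cons y ys ih =>
      have hstep : ∀ (d : PySem.Dict String (List String)),
          ((if d.contains x then d.modify x [] (· ++ [y]) else d.insert x [y])).getD x []
            = d.getD x [] ++ [y] := by
        intro d
        by_cases hc : d.contains x
        · rw [if_pos hc, PySem.Dict.getD_modify_self]
        · rw [if_neg hc, PySem.Dict.getD_insert_self,
            PySem.Dict.getD_of_not_contains d [] (by simpa using hc)]
          rfl
      show (pvAppendAll (if d.contains x then d.modify x [] (· ++ [y]) else d.insert x [y]) x ys).getD x [] = _
      rw [ih, hstep]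
      simp

theorem pv_appendAll_getD_ne (d : PySem.Dict String (List String)) (x x' : String)
    (ys : List String) (h : x' ≠ x) : (pvAppendAll d x ys).getD x' [] = d.getD x' [] := by
  induction ys generalizing d with
  | nil => rfl
  | cons y ys ih =>
      show (pvAppendAll (if d.contains x then d.modify x [] (· ++ [y]) else d.insert x [y]) x ys).getD x' [] = _
      rw [ih]
      by_cases hc : d.contains x
      · rw [if_pos hc, PySem.Dict.getD_modify, if_neg h]
      · rw [if_neg hc, PySem.Dict.getD_insert, if_neg h]

theorem pv_appendAll_keys (d : PySem.Dict String (List String)) (x : String)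
    (ys : List String) (h : ys ≠ []) :
    (pvAppendAll d x ys).keys = if d.contains x then d.keys else d.keys ++ [x] := by
  have haux : ∀ (ys : List String) (d : PySem.Dict String (List String)), d.contains x = true →
      (pvAppendAll d x ys).keys = d.keys := by
    intro ys
    induction ys with
    | nil => intro d _; rfl
    | cons y ys ih =>
        intro d hc
        show (pvAppendAll (if d.contains x then d.modify x [] (· ++ [y]) else d.insert x [y]) x ys).keys = _
        rw [if_pos hc, ih _ (by simp [PySem.Dict.contains_modify]),
          PySem.Dict.keys_modify, PySem.Dict.keys_insert_of_contains _ _ hc]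
  match ys, h with
  | y :: ys, _ =>
    show (pvAppendAll (if d.contains x then d.modify x [] (· ++ [y]) else d.insert x [y]) x ys).keys = _
    by_cases hc : d.contains x
    · rw [if_pos hc, haux ys _ (by simp [PySem.Dict.contains_modify]),
        PySem.Dict.keys_modify, PySem.Dict.keys_insert_of_contains _ _ hc, if_pos hc]
    · rw [if_neg hc, haux ys _ (PySem.Dict.contains_insert_self _ _ _),
        PySem.Dict.keys_insert_of_not_contains _ _ (by simpa using hc), if_neg hc]

theorem pv_appendAll_nodup_keys (d : PySem.Dict String (List String)) (x : String)
    (ys : List String) (h : d.keys.Nodup) : (pvAppendAll d x ys).keys.Nodup := by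
  refine pv_foldl_pres (fun d => d.keys.Nodup) _ ys (fun d y hd => ?_) d h
  show (if d.contains x then d.modify x [] (· ++ [y]) else d.insert x [y]).keys.Nodup
  by_cases hc : d.contains x
  · rw [if_pos hc, PySem.Dict.keys_modify]
    exact PySem.Dict.nodup_keys_insert _ _ _ hd
  · rw [if_neg hc]
    exact PySem.Dict.nodup_keys_insert _ _ _ hd

theorem pv_contains_eq (dA : PySem.Dict String (List String))
    (dB : PySem.Dict String (PySem.Set String)) (x : String) (h : dA.keys = dB.keys) :
    dA.contains x = dB.contains x := by
  rw [PySem.Dict.contains_eq_decide_mem_keys, PySem.Dict.contains_eq_decide_mem_keys, h]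

theorem pv_Rstep (x : String) (ys : List String) (dA : PySem.Dict String (List String))
    (dB : PySem.Dict String (PySem.Set String)) (h : pvR dA dB) :
    pvR (pvAppendAll dA x ys)
      (if ys = [] then dB else dB.insert x (PySem.Set.union (dB.getD x []) ys)) := by
  obtain ⟨hk, hnd, hv⟩ := h
  rcases eq_or_ne ys [] with rfl | hne
  · exact ⟨hk, hnd, hv⟩
  rw [if_neg hne]
  have hc : dA.contains x = dB.contains x := pv_contains_eq dA dB x hk
  refine ⟨?_, pv_appendAll_nodup_keys dA x ys hnd, fun x' => ?_⟩
  · rw [pv_appendAll_keys dA x ys hne]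
    by_cases hcx : dB.contains x
    · rw [if_pos (by rw [hc]; exact hcx), PySem.Dict.keys_insert_of_contains _ _ hcx, hk]
    · rw [if_neg (by rw [hc]; simpa using hcx),
        PySem.Dict.keys_insert_of_not_contains _ _ (by simpa using hcx), hk]
  · by_cases hx : x' = x
    · subst hx
      rw [pv_appendAll_getD_self, PySem.Dict.getD_insert, if_pos rfl,
        PySem.Set.ofList_append, hv]
      rfl
    · rw [pv_appendAll_getD_ne _ _ _ _ hx, PySem.Dict.getD_insert, if_neg hx, hv]

theorem pv_len_eq {α : Type} (l : List α) : PySem.List.len l = (l.length : Int) := by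
  simp [PySem.List.len]

theorem pv_tloop (row : List String) (jn : Nat) (d : PySem.Dict String (List String)) :
    (PySem.List.pyRange 0 (PySem.List.len row)).foldl (fun dic t =>
      if (jn : Int) == t then dic
      else
        if dic.contains (PySem.List.pyGetD row (jn : Int) "") then
          dic.modify (PySem.List.pyGetD row (jn : Int) "") [] (· ++ [PySem.List.pyGetD row t ""])
        else dic.insert (PySem.List.pyGetD row (jn : Int) "") [PySem.List.pyGetD row t ""]) d
    = pvAppendAll d (row.getD jn "") (row.take jn ++ row.drop (jn + 1)) := by
  rw [pv_len_eq, PySem.List.pyRange_zero_natCast, List.foldl_map]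
  have heq : (fun (dic : PySem.Dict String (List String)) (t : Nat) =>
      if (jn : Int) == (t : Int) then dic
      else
        if dic.contains (PySem.List.pyGetD row (jn : Int) "") then
          dic.modify (PySem.List.pyGetD row (jn : Int) "") [] (· ++ [PySem.List.pyGetD row (t : Int) ""])
        else dic.insert (PySem.List.pyGetD row (jn : Int) "") [PySem.List.pyGetD row (t : Int) ""])
      = fun dic t =>
        if jn = t then dic
        else
          if dic.contains (row.getD jn "") then
            dic.modify (row.getD jn "") [] (· ++ [row.getD t ""])
          else dic.insert (row.getD jn "") [row.getD t ""] := by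
    funext dic t
    by_cases h : jn = t <;> simp [h, PySem.List.pyGetD_natCast]
  rw [heq]
  exact pv_skipfold (fun dic y =>
    if dic.contains (row.getD jn "") then dic.modify (row.getD jn "") [] (· ++ [y])
    else dic.insert (row.getD jn "") [y]) "" row jn d

theorem pv_row_rel (row : List String) (dA : PySem.Dict String (List String))
    (dB : PySem.Dict String (PySem.Set String)) (h : pvR dA dB) :
    pvR ((PySem.List.pyRange 0 (PySem.List.len row)).foldl (fun dic j =>
          (PySem.List.pyRange 0 (PySem.List.len row)).foldl (fun dic t =>
            if j == t then dic
            else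
              if dic.contains (PySem.List.pyGetD row j "") then
                dic.modify (PySem.List.pyGetD row j "") [] (· ++ [PySem.List.pyGetD row t ""])
              else dic.insert (PySem.List.pyGetD row j "") [PySem.List.pyGetD row t ""]) dic) dA)
        ((PySem.List.pyRange 0 (PySem.List.len row)).foldl (fun dic j =>
          if (PySem.List.slice row none (some j) ++ PySem.List.slice row (some (j + 1)) none) = []
          then dic
          else dic.insert (PySem.List.pyGetD row j "")
            (PySem.Set.union (dic.getD (PySem.List.pyGetD row j "") [])
              (PySem.List.slice row none (some j) ++ PySem.List.slice row (some (j + 1)) none))) dB) := by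
  refine pv_foldl_rel pvR _ _ (PySem.List.pyRange 0 (PySem.List.len row))
    (fun b c j hj hbc => ?_) dA dB h
  have hj0 : 0 ≤ j := by
    rw [pv_len_eq] at hj
    exact (PySem.List.mem_pyRange_one.mp hj).1
  obtain ⟨jn, rfl⟩ : ∃ jn : Nat, j = (jn : Int) := ⟨j.toNat, (Int.toNat_of_nonneg hj0).symm⟩
  have h1 : PySem.List.slice row none (some (jn : Int)) = row.take jn := by
    rw [PySem.List.slice_to row (by positivity)]
    simp
  have h2 : PySem.List.slice row (some ((jn : Int) + 1)) none = row.drop (jn + 1) := by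
    rw [show ((jn : Int) + 1) = ((jn + 1 : Nat) : Int) by push_cast; ring,
      PySem.List.slice_from row (by positivity)]
    simp
  rw [pv_tloop row jn b, h1, h2, PySem.List.pyGetD_natCast]
  exact pv_Rstep _ _ _ _ hbc

-- Main lemma 3: the two dict constructions agree
theorem pv_build_rel (prj : List (List String)) : pvR (pvBuildA prj) (pvBuildB prj) := by
  unfold pvBuildA pvBuildB
  rw [PySem.List.foldl_pyRange_pyGetD prj []
    (fun dic row => (PySem.List.pyRange 0 (PySem.List.len row)).foldl (fun dic j =>
      (PySem.List.pyRange 0 (PySem.List.len row)).foldl (fun dic t =>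
        if j == t then dic
        else
          if dic.contains (PySem.List.pyGetD row j "") then
            dic.modify (PySem.List.pyGetD row j "") [] (· ++ [PySem.List.pyGetD row t ""])
          else dic.insert (PySem.List.pyGetD row j "") [PySem.List.pyGetD row t ""]) dic) dic)
    PySem.Dict.empty (le_refl 0)]
  simp only [Int.toNat_zero, List.drop_zero]
  refine pv_foldl_rel pvR _ _ prj (fun dA dB row _ hr => pv_row_rel row dA dB hr) _ _ ?_
  exact ⟨rfl, PySem.Dict.nodup_keys_empty, fun x => by simp⟩

theorem pv_modfold_getD (f : List String → List String) :
    ∀ (l : List String) (d : PySem.Dict String (List String)) (x : String), l.Nodup →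
    (l.foldl (fun d i => d.modify i [] f) d).getD x []
      = if x ∈ l then f (d.getD x []) else d.getD x [] := by
  intro l
  induction l with
  | nil => intro d x _; simp
  | cons i l ih =>
      intro d x hnd
      rw [List.foldl_cons, ih _ _ (List.nodup_cons.mp hnd).2]
      by_cases hx : x = i
      · subst hx
        rw [if_neg ((List.nodup_cons.mp hnd).1), if_pos (by simp), PySem.Dict.getD_modify_self]
      · rw [PySem.Dict.getD_modify, if_neg hx]
        by_cases hxl : x ∈ l
        · rw [if_pos hxl, if_pos (by simp [hxl])]
        · rw [if_neg hxl, if_neg (by simp [hx, hxl])]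

theorem pv_insfold_getD (l : List String) (x : String) :
    (l.foldl (fun d i => d.insert i (0 : Int)) PySem.Dict.empty).getD x 0 = 0 := by
  have haux : ∀ (l : List String) (d : PySem.Dict String Int) (x : String), d.getD x 0 = 0 →
      (l.foldl (fun d i => d.insert i (0 : Int)) d).getD x 0 = 0 := by
    intro l
    induction l with
    | nil => exact fun d x h => h
    | cons i l ih =>
        intro d x h
        rw [List.foldl_cons]
        refine ih _ _ ?_
        rw [PySem.Dict.getD_insert]
        split <;> simp [h]
  exact haux l _ x (by simp)

-- ===== VERDICT (by name: the statement is the Claim_ definition above) =====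
theorem solution_spec : Claim_equal_solution := by
  intro prj n k _hdom _hpre
  unfold Spec_solution
  obtain ⟨hk, hndk, hv⟩ := pv_build_rel prj
  simp only [solution, solution_alt]
  rw [PySem.List.foldl_prod_mk (f := fun (a : List String) (i : String) => a ++ [i])
    (g := fun (d : PySem.Dict String (List String)) (i : String) =>
      d.modify i [] (fun v => PySem.List.sorted (PySem.Set.ofList v) (fun x => x) false))]
  rw [PySem.List.foldl_append_singleton_eq_self, List.nil_append]
  rw [pv_dfs_eq]
  simp only [String.empty_append, List.map_id']
  have hnodup : ∀ node ∈ PySem.List.sorted (pvBuildA prj).keys (fun x => x) false,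
      ∀ j ∈ PySem.List.combinations
        (((pvBuildA prj).keys.foldl (fun d i =>
            d.modify i [] (fun v => PySem.List.sorted (PySem.Set.ofList v) (fun x => x) false))
          (pvBuildA prj)).getD node []) n.toNat, j.Nodup := by
    intro node hnode j hj
    have hmem : node ∈ (pvBuildA prj).keys :=
      (PySem.List.sorted_perm _ _ _).mem_iff.mp hnode
    rw [pv_modfold_getD _ (pvBuildA prj).keys (pvBuildA prj) node hndk, if_pos hmem] at hj
    have hnd : (PySem.List.sorted (PySem.Set.ofList ((pvBuildA prj).getD node []))
        (fun x => x) false).Nodup :=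
      ((PySem.List.sorted_perm _ _ _).nodup_iff).mpr (PySem.Set.nodup_ofList _)
    exact (PySem.List.sublist_of_mem_combinations hj).nodup hnd
  rw [pv_valids_eq _ k _ _ hnodup]
  have hch0 : ∀ x, ((PySem.List.sorted (pvBuildA prj).keys (fun x => x) false).foldl
      (fun d i => d.insert i (0 : Int)) PySem.Dict.empty).getD x 0 = 0 :=
    fun x => pv_insfold_getD _ x
  have hcond : ∀ flat : List String,
      pvCondL ((PySem.List.sorted (pvBuildA prj).keys (fun x => x) false).foldl
        (fun d i => d.insert i (0 : Int)) PySem.Dict.empty) k flat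
      = flat.all (fun l => decide ((flat.count l : Int) ≤ k)) := by
    intro flat
    unfold pvCondL
    simp only [hch0, zero_add]
  have hmap : (PySem.List.sorted (pvBuildA prj).keys (fun x => x) false).map
      (fun node => PySem.List.combinations
        (((pvBuildA prj).keys.foldl (fun d i =>
            d.modify i [] (fun v => PySem.List.sorted (PySem.Set.ofList v) (fun x => x) false))
          (pvBuildA prj)).getD node []) n.toNat)
      = (PySem.List.sorted (pvBuildB prj).keys (fun x => x) false).map
        (fun x => PySem.List.combinations
          (PySem.List.sorted ((pvBuildB prj).getD x []) (fun y => y) false) n.toNat) := by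
    rw [← hk]
    refine List.map_congr_left (fun x hx => ?_)
    have hmem : x ∈ (pvBuildA prj).keys := (PySem.List.sorted_perm _ _ _).mem_iff.mp hx
    rw [pv_modfold_getD _ (pvBuildA prj).keys (pvBuildA prj) x hndk, if_pos hmem, hv x]
  rw [hmap]
  have hfm : ∀ combo : List (List String),
      (if pvCondL ((PySem.List.sorted (pvBuildA prj).keys (fun x => x) false).foldl
          (fun d i => d.insert i (0 : Int)) PySem.Dict.empty) k (combo.flatMap (fun c => c))
        then some (pvSJoin (combo.flatMap (fun c => c))) else none)
      = (if (combo.flatMap (fun c => c)).all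
            (fun l => decide (((combo.flatMap (fun c => c)).count l : Int) ≤ k))
          then some (pvSJoin (combo.flatMap (fun c => c))) else none) := by
    intro combo
    rw [hcond]
  simp only [hfm]
  rw [pv_foldl_filterMap_if]
  congr 1
  funext b combo
  simp only [pvStep, pv_sjoin_join, PySem.List.count]
  rfl
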